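-- pv_equiv track=rewrite | github.com/jafet41/HackerRankExercises | NoIdea_BinarySearch.py | computeHappiness
-- ===== SOURCE A (Python) =====
-- def binary_search(list_num, first_index, last_index, to_search):
--     if last_index >= first_index:
--         mid_index = (first_index + last_index) // 2
--         mid_element = list_num[mid_index]
--         if mid_element == to_search:
--             return mid_index
--         elif mid_element > to_search:
--             new_position = mid_index - 1
--             return binary_search(list_num, first_index, new_position, to_search)
--         elif mid_element < to_search:
--             new_position = mid_index + 1
--             return binary_search(list_num, new_position, last_index, to_search)
--     else:
--         return -1
--
-- def computeHappiness(n,m,l1,A,B):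
--     h=0
--     sortA=list(A)
--     sortB=list(B)
--     sortA.sort()
--     sortB.sort()
--     for x in l1:
--         if binary_search(sortA,0,len(sortA)-1,x)>-1:
--             h+=1
--         if binary_search(sortB,0,len(sortB)-1,x)>-1:
--             h+=-1
--     return h
-- ===== SOURCE B (Python) =====
-- def computeHappiness(n, m, l1, A, B):
--     sa = set(A)
--     sb = set(B)
--     return sum((x in sa) - (x in sb) for x in l1)
-- ===== Notes on version B (the rewrite author's own statement) =====
-- stated objective: faster
-- what changed: Replaced sorting A and B plus a recursive binary search per element of l1 by two hash sets built once and a single pass over l1 summing membership indicators.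
import Mathlib
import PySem

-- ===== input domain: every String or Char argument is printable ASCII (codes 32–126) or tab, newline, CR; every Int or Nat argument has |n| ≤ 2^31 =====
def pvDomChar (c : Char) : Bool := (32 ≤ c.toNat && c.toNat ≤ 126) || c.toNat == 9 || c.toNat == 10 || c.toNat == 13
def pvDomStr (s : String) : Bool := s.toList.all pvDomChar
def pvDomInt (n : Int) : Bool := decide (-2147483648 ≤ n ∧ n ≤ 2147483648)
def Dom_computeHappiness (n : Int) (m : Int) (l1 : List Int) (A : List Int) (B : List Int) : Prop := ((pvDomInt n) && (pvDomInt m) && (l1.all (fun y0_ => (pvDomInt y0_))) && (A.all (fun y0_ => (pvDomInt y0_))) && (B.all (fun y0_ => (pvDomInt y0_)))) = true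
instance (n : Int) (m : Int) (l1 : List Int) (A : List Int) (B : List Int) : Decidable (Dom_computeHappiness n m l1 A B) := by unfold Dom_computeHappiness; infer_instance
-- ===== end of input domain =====

-- B replaces the per-element recursive binary search over sorted copies by two hash sets
-- built once and a single linear pass over l1 (objective: faster, simpler).

-- ===== PORT A =====
-- literal port of binary_search; the `none` branch is Python's IndexError, unreachable
-- from computeHappiness's calls (indices stay within the list)
def binarySearch (list_num : List Int) (first_index last_index to_search : Int) : Int :=
  if h : last_index ≥ first_index then
    let mid_index := PySem.Int.floordiv (first_index + last_index) 2
    match PySem.List.pyGet? list_num mid_index with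
    | none => -1
    | some mid_element =>
      if mid_element = to_search then mid_index
      else if mid_element > to_search then
        binarySearch list_num first_index (mid_index - 1) to_search
      else
        binarySearch list_num (mid_index + 1) last_index to_search
  else
    -1
termination_by (last_index - first_index + 1).toNat
decreasing_by
  · have := PySem.Int.floordiv_two_mid_bounds h
    omega
  · have := PySem.Int.floordiv_two_mid_bounds h
    omega

def computeHappiness (n : Int) (m : Int) (l1 : List Int) (A : List Int) (B : List Int) : Int :=
  let sortA := PySem.List.sorted A (fun x => x) false
  let sortB := PySem.List.sorted B (fun x => x) false
  l1.foldl (fun h x =>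
    let h := if binarySearch sortA 0 ((sortA.length : Int) - 1) x > -1 then h + 1 else h
    if binarySearch sortB 0 ((sortB.length : Int) - 1) x > -1 then h + (-1) else h) 0

-- ===== PORT B =====
def computeHappiness_alt (n : Int) (m : Int) (l1 : List Int) (A : List Int) (B : List Int) : Int :=
  let sa := PySem.Set.ofList A
  let sb := PySem.Set.ofList B
  (l1.map (fun x => (if x ∈ sa then (1 : Int) else 0) - (if x ∈ sb then (1 : Int) else 0))).sum

-- ===== PRECONDITION & SPEC =====
def Spec_computeHappiness (n : Int) (m : Int) (l1 : List Int) (A : List Int) (B : List Int) (out : Int) : Prop := out = computeHappiness_alt n m l1 A B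
instance (n : Int) (m : Int) (l1 : List Int) (A : List Int) (B : List Int) (out : Int) : Decidable (Spec_computeHappiness n m l1 A B out) := by unfold Spec_computeHappiness; infer_instance

-- ===== CLAIM (what is proved, stated in full; the proofs are below) =====
def Claim_equal_computeHappiness : Prop := ∀ (n : Int) (m : Int) (l1 : List Int) (A : List Int) (B : List Int), Dom_computeHappiness n m l1 A B → Spec_computeHappiness n m l1 A B (computeHappiness n m l1 A B)

-- ===== LEMMAS AND PROOFS =====

-- binary search on a sorted list finds x in [lo,hi] iff some index there holds x
theorem bs_iff (fuel : Nat) (s : List Int) (hs : s.Pairwise (fun a b => a ≤ b)) :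
    ∀ (lo hi x : Int), (hi - lo + 1).toNat ≤ fuel → 0 ≤ lo → hi < (s.length : Int) →
    (binarySearch s lo hi x > -1 ↔
      ∃ k : Nat, lo ≤ (k : Int) ∧ (k : Int) ≤ hi ∧ s[k]? = some x) := by
  induction fuel with
  | zero =>
    intro lo hi x hf hlo hhi
    rw [binarySearch]
    simp only [ge_iff_le, dif_neg (by omega : ¬ lo ≤ hi)]
    constructor
    · intro h; omega
    · rintro ⟨k, h1, h2, _⟩; omega
  | succ f ih =>
    intro lo hi x hf hlo hhi
    by_cases hle : lo ≤ hi
    · have hb := PySem.Int.floordiv_two_mid_bounds hle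
      have h0m : (0:Int) ≤ PySem.Int.floordiv (lo + hi) 2 := by omega
      have h1m : PySem.Int.floordiv (lo + hi) 2 < (s.length : Int) := by omega
      have hmem : PySem.List.pyGet? s (PySem.Int.floordiv (lo + hi) 2)
          = some s[(PySem.Int.floordiv (lo + hi) 2).toNat] :=
        PySem.List.pyGet?_eq_some_getElem s h0m h1m
      rw [binarySearch]
      simp only [ge_iff_le, dif_pos hle, hmem]
      have hpw := (List.pairwise_iff_getElem).1 hs
      by_cases heq : s[(PySem.Int.floordiv (lo + hi) 2).toNat] = x
      · simp only [if_pos heq]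
        constructor
        · intro _
          exact ⟨(PySem.Int.floordiv (lo + hi) 2).toNat, by omega, by omega,
            by rw [List.getElem?_eq_getElem (by omega)]; exact congrArg some heq⟩
        · intro _; omega
      · simp only [if_neg heq]
        by_cases hgt : s[(PySem.Int.floordiv (lo + hi) 2).toNat] > x
        · simp only [if_pos hgt]
          rw [ih lo (PySem.Int.floordiv (lo + hi) 2 - 1) x (by omega) hlo (by omega)]
          constructor
          · rintro ⟨k, h1, h2, h3⟩; exact ⟨k, h1, by omega, h3⟩
          · rintro ⟨k, h1, h2, h3⟩
            refine ⟨k, h1, ?_, h3⟩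
            by_contra hk
            have hklen : k < s.length := (List.getElem?_eq_some_iff.1 h3).1
            have hxk : s[k] = x := (List.getElem?_eq_some_iff.1 h3).2
            rcases eq_or_lt_of_le (show (PySem.Int.floordiv (lo + hi) 2).toNat ≤ k by omega)
              with he | hlt
            · have hsk : s[(PySem.Int.floordiv (lo + hi) 2).toNat] = s[k] := by
                congr 1
              exact heq (hsk.trans hxk)
            · have := hpw (PySem.Int.floordiv (lo + hi) 2).toNat k (by omega) hklen hlt
              rw [hxk] at this; omega
        · simp only [if_neg hgt]
          rw [ih (PySem.Int.floordiv (lo + hi) 2 + 1) hi x (by omega) (by omega) hhi]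
          constructor
          · rintro ⟨k, h1, h2, h3⟩; exact ⟨k, by omega, h2, h3⟩
          · rintro ⟨k, h1, h2, h3⟩
            refine ⟨k, ?_, h2, h3⟩
            by_contra hk
            have hklen : k < s.length := (List.getElem?_eq_some_iff.1 h3).1
            have hxk : s[k] = x := (List.getElem?_eq_some_iff.1 h3).2
            rcases eq_or_lt_of_le (show k ≤ (PySem.Int.floordiv (lo + hi) 2).toNat by omega)
              with he | hlt
            · have hsk : s[k] = s[(PySem.Int.floordiv (lo + hi) 2).toNat] := by
                congr 1
              exact heq (hsk.symm.trans hxk)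
            · have := hpw k (PySem.Int.floordiv (lo + hi) 2).toNat hklen (by omega) hlt
              rw [hxk] at this; omega
    · rw [binarySearch]
      simp only [ge_iff_le, dif_neg hle]
      constructor
      · intro h; omega
      · rintro ⟨k, h1, h2, _⟩; omega

-- the call shape used by computeHappiness: search over sorted L decides membership in L
theorem bs_mem (L : List Int) (x : Int) :
    (binarySearch (PySem.List.sorted L (fun x => x) false) 0
        (((PySem.List.sorted L (fun x => x) false).length : Int) - 1) x > -1) ↔ x ∈ L := by
  have hs : (PySem.List.sorted L (fun x => x) false).Pairwise (fun a b => a ≤ b) :=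
    PySem.List.sorted_pairwise L (fun x => x)
  rw [bs_iff (((PySem.List.sorted L (fun x => x) false).length : Int) + 1).toNat
      (PySem.List.sorted L (fun x => x) false) hs 0
      (((PySem.List.sorted L (fun x => x) false).length : Int) - 1) x (by omega) (by omega) (by omega)]
  constructor
  · rintro ⟨k, _, _, h3⟩
    have hm : x ∈ PySem.List.sorted L (fun x => x) false :=
      (List.getElem?_eq_some_iff.1 h3).2 ▸ List.getElem_mem (List.getElem?_eq_some_iff.1 h3).1
    rwa [PySem.List.mem_sorted] at hm
  · intro hx
    have hx' : x ∈ PySem.List.sorted L (fun x => x) false := by rwa [PySem.List.mem_sorted]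
    obtain ⟨k, hk, he⟩ := List.mem_iff_getElem.1 hx'
    exact ⟨k, by omega, by omega, by rw [List.getElem?_eq_getElem hk]; exact congrArg some he⟩

-- A's fold with accumulated increments equals B's sum of per-element increments
theorem fold_eq_sum (l1 : List Int) (g : Int → Int) :
    ∀ init : Int, l1.foldl (fun h x => h + g x) init = init + (l1.map g).sum := by
  induction l1 with
  | nil => intro init; simp
  | cons y t ih => intro init; simp [List.foldl_cons, ih]; ring

-- ===== VERDICT (by name: the statement is the Claim_ definition above) =====
theorem computeHappiness_spec : Claim_equal_computeHappiness := by
  intro n m l1 A B _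
  unfold Spec_computeHappiness computeHappiness computeHappiness_alt
  show l1.foldl (fun h x =>
      let h' := if binarySearch (PySem.List.sorted A (fun x => x) false) 0
          (((PySem.List.sorted A (fun x => x) false).length : Int) - 1) x > -1 then h + 1 else h
      if binarySearch (PySem.List.sorted B (fun x => x) false) 0
          (((PySem.List.sorted B (fun x => x) false).length : Int) - 1) x > -1 then h' + (-1) else h') 0
    = (l1.map (fun x => (if x ∈ PySem.Set.ofList A then (1 : Int) else 0)
        - (if x ∈ PySem.Set.ofList B then (1 : Int) else 0))).sum
  have hfun : (fun (h x : Int) =>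
      let h' := if binarySearch (PySem.List.sorted A (fun x => x) false) 0
          (((PySem.List.sorted A (fun x => x) false).length : Int) - 1) x > -1 then h + 1 else h
      if binarySearch (PySem.List.sorted B (fun x => x) false) 0
          (((PySem.List.sorted B (fun x => x) false).length : Int) - 1) x > -1 then h' + (-1) else h')
      = fun (h x : Int) => h + ((if x ∈ PySem.Set.ofList A then (1 : Int) else 0)
        - (if x ∈ PySem.Set.ofList B then (1 : Int) else 0)) := by
    funext h x
    have hA : (binarySearch (PySem.List.sorted A (fun x => x) false) 0
        (((PySem.List.sorted A (fun x => x) false).length : Int) - 1) x > -1)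
        ↔ x ∈ PySem.Set.ofList A := (bs_mem A x).trans (PySem.Set.mem_ofList A x).symm
    have hB : (binarySearch (PySem.List.sorted B (fun x => x) false) 0
        (((PySem.List.sorted B (fun x => x) false).length : Int) - 1) x > -1)
        ↔ x ∈ PySem.Set.ofList B := (bs_mem B x).trans (PySem.Set.mem_ofList B x).symm
    show (if binarySearch (PySem.List.sorted B (fun x => x) false) 0
          (((PySem.List.sorted B (fun x => x) false).length : Int) - 1) x > -1
        then (if binarySearch (PySem.List.sorted A (fun x => x) false) 0
          (((PySem.List.sorted A (fun x => x) false).length : Int) - 1) x > -1 then h + 1 else h) + (-1)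
        else (if binarySearch (PySem.List.sorted A (fun x => x) false) 0
          (((PySem.List.sorted A (fun x => x) false).length : Int) - 1) x > -1 then h + 1 else h))
      = h + ((if x ∈ PySem.Set.ofList A then (1 : Int) else 0)
        - (if x ∈ PySem.Set.ofList B then (1 : Int) else 0))
    by_cases ha : x ∈ PySem.Set.ofList A <;> by_cases hb : x ∈ PySem.Set.ofList B
    · rw [if_pos (hB.2 hb), if_pos (hA.2 ha), if_pos ha, if_pos hb]; ring
    · rw [if_neg (fun c => hb (hB.1 c)), if_pos (hA.2 ha), if_pos ha, if_neg hb]; ring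
    · rw [if_pos (hB.2 hb), if_neg (fun c => ha (hA.1 c)), if_neg ha, if_pos hb]; ring
    · rw [if_neg (fun c => hb (hB.1 c)), if_neg (fun c => ha (hA.1 c)), if_neg ha, if_neg hb]; ring
  rw [hfun, fold_eq_sum]
  ring
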